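-- pv_equiv track=rewrite | github.com/tamirco2002/ALMA_Luminous_AGNs_Z_2_3.5 | src/Extensions.py | orderSEDsLabels
-- ===== SOURCE A (Python) =====
-- def orderSEDsLabels(labels):
--     finalOrder = []
--     for l in range(len(labels)):
--         if 'ALMA' in labels[l]:
--             finalOrder.append(l)
--             break
--     for l in range(len(labels)):
--         if 'Netzer' in labels[l]:
--             finalOrder.append(l)
--             break
--     for l in range(len(labels)):
--         if 'Chary' in labels[l]:
--             finalOrder.append(l)
--             break
--     for l in range(len(labels)):
--         if 'Torus' in labels[l]:
--             finalOrder.append(l)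
--             break
--     for l in range(len(labels)):
--         if '47' in labels[l] and '1.6' in labels[l]:
--             finalOrder.append(l)
--             break
--     for l in range(len(labels)):
--         if '47' not in labels[l] and '1.6' in labels[l]:
--             finalOrder.append(l)
--             break
--     for l in range(len(labels)):
--         if 'Gray-Body' in labels[l] and '47' not in labels[l] and '1.6' not in labels[l]:
--             finalOrder.append(l)
--             break
--     return finalOrder
-- ===== SOURCE B (Python) =====
-- # One pass over the labels, recording each category's first matching index, then emit in fixed category order.
-- PREDS = [
--     lambda s: 'ALMA' in s,
--     lambda s: 'Netzer' in s,
--     lambda s: 'Chary' in s,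
--     lambda s: 'Torus' in s,
--     lambda s: '47' in s and '1.6' in s,
--     lambda s: '47' not in s and '1.6' in s,
--     lambda s: 'Gray-Body' in s and '47' not in s and '1.6' not in s,
-- ]
--
-- def orderSEDsLabels(labels):
--     first = [None] * len(PREDS)
--     for i, s in enumerate(labels):
--         first = [i if f is None and p(s) else f for f, p in zip(first, PREDS)]
--     return [f for f in first if f is not None]
-- ===== Notes on version B (the rewrite author's own statement) =====
-- stated objective: alternative
-- what changed: B replaces A's seven separate break-on-first-match scans of the label list by a single pass that records each category's first matching index and then emits the recorded indices in the fixed category order.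
import Mathlib
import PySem

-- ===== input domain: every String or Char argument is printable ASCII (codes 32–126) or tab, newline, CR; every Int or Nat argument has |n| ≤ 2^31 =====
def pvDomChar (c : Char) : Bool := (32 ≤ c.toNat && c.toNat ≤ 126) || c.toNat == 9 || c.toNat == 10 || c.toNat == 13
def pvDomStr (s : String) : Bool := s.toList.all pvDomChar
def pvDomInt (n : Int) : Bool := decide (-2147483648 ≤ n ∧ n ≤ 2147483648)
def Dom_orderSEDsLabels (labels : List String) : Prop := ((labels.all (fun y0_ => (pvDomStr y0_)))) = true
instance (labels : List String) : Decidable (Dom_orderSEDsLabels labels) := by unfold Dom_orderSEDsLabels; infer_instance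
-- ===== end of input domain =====

-- B is a single pass recording each category's first matching index, emitted in the fixed category order; A makes seven break-on-first-match scans.

-- ===== PORT A =====
-- each Python loop 'for l in range(len(labels)): if p(labels[l]): finalOrder.append(l); break'
def pvLoopA (labels : List String) (p : String → Bool) : List Int → List Int
  | [] => []
  | i :: rest => if p (PySem.List.pyGetD labels i "") then [i] else pvLoopA labels p rest

def orderSEDsLabels (labels : List String) : List Int :=
  let r := PySem.List.pyRange 0 (labels.length : Int) 1
  pvLoopA labels (fun s => PySem.Str.isIn "ALMA" s) r
    ++ pvLoopA labels (fun s => PySem.Str.isIn "Netzer" s) r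
    ++ pvLoopA labels (fun s => PySem.Str.isIn "Chary" s) r
    ++ pvLoopA labels (fun s => PySem.Str.isIn "Torus" s) r
    ++ pvLoopA labels (fun s => PySem.Str.isIn "47" s && PySem.Str.isIn "1.6" s) r
    ++ pvLoopA labels (fun s => !PySem.Str.isIn "47" s && PySem.Str.isIn "1.6" s) r
    ++ pvLoopA labels (fun s => PySem.Str.isIn "Gray-Body" s && !PySem.Str.isIn "47" s && !PySem.Str.isIn "1.6" s) r

-- ===== PORT B =====
def pvPreds : List (String → Bool) :=
  [ fun s => PySem.Str.isIn "ALMA" s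
  , fun s => PySem.Str.isIn "Netzer" s
  , fun s => PySem.Str.isIn "Chary" s
  , fun s => PySem.Str.isIn "Torus" s
  , fun s => PySem.Str.isIn "47" s && PySem.Str.isIn "1.6" s
  , fun s => !PySem.Str.isIn "47" s && PySem.Str.isIn "1.6" s
  , fun s => PySem.Str.isIn "Gray-Body" s && !PySem.Str.isIn "47" s && !PySem.Str.isIn "1.6" s ]

-- 'first = [i if f is None and p(s) else f for f, p in zip(first, PREDS)]'
def pvStepB (first : List (Option Int)) (is_ : Int × String) : List (Option Int) :=
  (first.zip pvPreds).map (fun fp => if fp.1.isNone && fp.2 is_.2 then some is_.1 else fp.1)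

def orderSEDsLabels_alt (labels : List String) : List Int :=
  let first := (PySem.List.enumerate labels 0).foldl pvStepB (pvPreds.map (fun _ => none))
  first.filterMap id

-- ===== PRECONDITION & SPEC =====
def Spec_orderSEDsLabels (labels : List String) (out : List Int) : Prop := out = orderSEDsLabels_alt labels
instance (labels : List String) (out : List Int) : Decidable (Spec_orderSEDsLabels labels out) := by unfold Spec_orderSEDsLabels; infer_instance

-- ===== CLAIM (what is proved, stated in full; the proofs are below) =====
def Claim_equal_orderSEDsLabels : Prop := ∀ (labels : List String), Dom_orderSEDsLabels labels → Spec_orderSEDsLabels labels (orderSEDsLabels labels)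

-- ===== LEMMAS AND PROOFS =====

-- common characterisation: first index ≥ k (in the suffix) whose label satisfies p
def pvFindFrom (p : String → Bool) (k : Int) : List String → Option Int
  | [] => none
  | s :: rest => if p s then some k else pvFindFrom p (k + 1) rest

theorem pvLoopA_eq (labels : List String) (p : String → Bool) :
    ∀ (k : Nat), pvLoopA labels p (PySem.List.pyRange (k : Int) (labels.length : Int) 1)
      = (pvFindFrom p (k : Int) (labels.drop k)).elim [] (fun i => [i]) := by
  intro k
  induction h : labels.length - k generalizing k with
  | zero =>
      have hk : labels.length ≤ k := by omega
      rw [PySem.List.pyRange_one_eq_nil (by exact_mod_cast hk)]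
      rw [List.drop_eq_nil_of_le hk]
      simp [pvLoopA, pvFindFrom]
  | succ n ih =>
      have hk : k < labels.length := by omega
      rw [PySem.List.pyRange_one_cons (by exact_mod_cast hk)]
      rw [List.drop_eq_getElem_cons hk]
      simp only [pvLoopA, pvFindFrom, PySem.List.pyGetD_natCast, List.getD_eq_getElem?_getD,
        List.getElem?_eq_getElem hk, Option.getD_some]
      by_cases hp : p labels[k]
      · simp [hp]
      · simp only [hp, Bool.false_eq_true, if_false]
        have := ih (k + 1) (by omega)
        rw [show ((k : Int) + 1) = ((k + 1 : Nat) : Int) by push_cast; ring]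
        exact this

-- per-slot step of B's comprehension
theorem pvSlot (o : Option Int) (p : String → Bool) (s : String) (k : Int) (rest : List String) :
    (if o.isNone && p s then some k else o).or (pvFindFrom p (k + 1) rest)
      = o.or (pvFindFrom p k (s :: rest)) := by
  cases o <;> cases hp : p s <;> simp [pvFindFrom, hp]

theorem foldB_eq (rest : List String) :
    ∀ (k : Int) (o₁ o₂ o₃ o₄ o₅ o₆ o₇ : Option Int),
      (PySem.List.enumerate rest k).foldl pvStepB [o₁, o₂, o₃, o₄, o₅, o₆, o₇]
        = (List.zip [o₁, o₂, o₃, o₄, o₅, o₆, o₇] pvPreds).map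
            (fun fp => fp.1.or (pvFindFrom fp.2 k rest)) := by
  induction rest with
  | nil => intro k o₁ o₂ o₃ o₄ o₅ o₆ o₇; simp [PySem.List.enumerate_nil, pvFindFrom, pvPreds]
  | cons s rest ih =>
      intro k o₁ o₂ o₃ o₄ o₅ o₆ o₇
      rw [PySem.List.enumerate_cons]
      simp only [List.foldl_cons]
      have hstep : pvStepB [o₁, o₂, o₃, o₄, o₅, o₆, o₇] (k, s)
          = (List.zip [o₁, o₂, o₃, o₄, o₅, o₆, o₇] pvPreds).map
              (fun fp => if fp.1.isNone && fp.2 s then some k else fp.1) := rfl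
      rw [hstep]
      simp only [pvPreds, List.zip_cons_cons, List.zip_nil_right, List.map_cons, List.map_nil]
      rw [ih]
      simp only [pvPreds, List.zip_cons_cons, List.zip_nil_right, List.map_cons, List.map_nil]
      have e := fun (o : Option Int) (p : String → Bool) => pvSlot o p s k rest
      rw [e o₁, e o₂, e o₃, e o₄,
        e o₅ (fun s => PySem.Str.isIn "47" s && PySem.Str.isIn "1.6" s),
        e o₆ (fun s => !PySem.Str.isIn "47" s && PySem.Str.isIn "1.6" s),
        e o₇ (fun s => PySem.Str.isIn "Gray-Body" s && !PySem.Str.isIn "47" s && !PySem.Str.isIn "1.6" s)]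

theorem filterMap_id_cons (o : Option Int) (l : List (Option Int)) :
    List.filterMap id (o :: l) = (o.elim [] fun i => [i]) ++ List.filterMap id l := by
  cases o <;> simp

-- ===== VERDICT (by name: the statement is the Claim_ definition above) =====
theorem orderSEDsLabels_spec : Claim_equal_orderSEDsLabels := by
  intro labels _
  unfold Spec_orderSEDsLabels orderSEDsLabels orderSEDsLabels_alt
  have hf := foldB_eq labels 0 none none none none none none none
  simp only [pvPreds, List.map_cons, List.map_nil] at hf ⊢
  rw [hf]
  simp only [List.zip_cons_cons, List.zip_nil_right, List.map_cons, List.map_nil,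
    Option.or]
  rw [filterMap_id_cons, filterMap_id_cons, filterMap_id_cons, filterMap_id_cons,
    filterMap_id_cons, filterMap_id_cons, filterMap_id_cons]
  simp only [List.filterMap_nil, List.append_nil]
  have h := fun p => pvLoopA_eq labels p 0
  simp only [Nat.cast_zero, List.drop_zero] at h
  rw [h, h, h, h, h, h, h]
  simp [List.append_assoc]
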